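-- pv_equiv track=rewrite | github.com/srnoejbnyvi/test1 | fef.py | extract_significant_tokens
-- ===== SOURCE A (Python) =====
-- def extract_significant_tokens(pattern, limit=8):
--     raw = []
--     for line in str(pattern).replace("\r", "").split("\n"):
--         part = line.strip()
--         if not part:
--             continue
--         if len(part) >= 4:
--             raw.append(part)
--     raw.sort(key=len, reverse=True)
--     result = []
--     seen = set()
--     for item in raw:
--         if item in seen:
--             continue
--         seen.add(item)
--         result.append(item)
--         if len(result) >= limit:
--             break
--     return result
-- ===== SOURCE B (Python) =====
-- def extract_significant_tokens(pattern, limit=8):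
--     pool = [part
--             for part in (line.strip() for line in str(pattern).replace("\r", "").split("\n"))
--             if len(part) >= 4]
--     result = []
--     while pool:
--         best = max(pool, key=len)
--         result.append(best)
--         if len(result) >= limit:
--             break
--         pool = [x for x in pool if x != best]
--     return result
-- ===== Notes on version B (the rewrite author's own statement) =====
-- stated objective: alternative
-- what changed: B never sorts and keeps no seen-set: it filters lines into a pool and then repeatedly selects max(pool, key=len) (Python's first-maximal tie rule = A's stable sort order), appends it, and removes all its copies from the pool, stopping at limit; A instead stable-sorts everything by length descending and scans with a seen-set dedup.
import Mathlib
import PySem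

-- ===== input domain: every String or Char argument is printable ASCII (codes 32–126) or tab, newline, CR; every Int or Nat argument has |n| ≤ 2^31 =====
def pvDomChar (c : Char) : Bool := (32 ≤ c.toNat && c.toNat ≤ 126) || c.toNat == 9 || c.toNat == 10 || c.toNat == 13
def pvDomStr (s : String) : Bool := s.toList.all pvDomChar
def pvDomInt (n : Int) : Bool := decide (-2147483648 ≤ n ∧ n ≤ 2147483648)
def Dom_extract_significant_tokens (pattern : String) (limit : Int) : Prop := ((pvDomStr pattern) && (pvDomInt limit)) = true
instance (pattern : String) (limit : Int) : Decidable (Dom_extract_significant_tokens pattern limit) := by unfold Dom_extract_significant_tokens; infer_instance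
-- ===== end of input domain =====

-- B replaces A's sort-then-dedup-scan with repeated selection of the first-longest element (no sort, no seen-set): same results (objective: alternative).

-- ===== PORT A =====
-- the filtering for-loop of A (strip, skip empty, keep len>=4)
def pvRawA (lines : List String) (acc : List String) : List String :=
  match lines with
  | [] => acc
  | line :: rest =>
    let part := PySem.Str.strip line
    if part = "" then pvRawA rest acc
    else if (4:Int) ≤ PySem.Str.len part then pvRawA rest (acc ++ [part])
    else pvRawA rest acc

-- A's result loop: seen-set dedup, append, break once len(result) >= limit
def pvLoopA (limit : Int) : List String → List String → PySem.Set String → List String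
  | [], result, _ => result
  | item :: rest, result, seen =>
    if seen.contains item then pvLoopA limit rest result seen
    else
      let seen' := seen.add item
      let result' := result ++ [item]
      if limit ≤ (result'.length : Int) then result' else pvLoopA limit rest result' seen'

def extract_significant_tokens (pattern : String) (limit : Int) : List String :=
  let raw := pvRawA ((PySem.Str.split? (PySem.Str.replace pattern "\r" "") "\n").getD []) []
  let raw := PySem.List.sorted raw PySem.Str.len true
  pvLoopA limit raw [] PySem.Set.empty

-- ===== PORT B =====
-- B's while-loop: best = max(pool, key=len) (none ⇔ pool empty ⇔ the while test fails),
-- append, break at limit, else drop every copy of best from the pool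
def pvSelect (limit : Int) (pool result : List String) : List String :=
  match hm : PySem.List.max? pool PySem.Str.len with
  | none => result
  | some best =>
    let result' := result ++ [best]
    if limit ≤ (result'.length : Int) then result'
    else pvSelect limit (pool.filter (fun x => !(x == best))) result'
termination_by pool.length
decreasing_by
  simp only [List.unattach_filter, List.unattach_attach]
  exact List.length_filter_lt_length_iff_exists.mpr ⟨best, PySem.List.max?_mem hm, by simp⟩

def extract_significant_tokens_alt (pattern : String) (limit : Int) : List String :=
  let lines := (PySem.Str.split? (PySem.Str.replace pattern "\r" "") "\n").getD []
  let pool := (lines.map PySem.Str.strip).filter (fun part => (4:Int) ≤ PySem.Str.len part)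
  pvSelect limit pool []

-- ===== PRECONDITION & SPEC =====
def Spec_extract_significant_tokens (pattern : String) (limit : Int) (out : List String) : Prop := out = extract_significant_tokens_alt pattern limit
instance (pattern : String) (limit : Int) (out : List String) : Decidable (Spec_extract_significant_tokens pattern limit out) := by unfold Spec_extract_significant_tokens; infer_instance

-- ===== CLAIM (what is proved, stated in full; the proofs are below) =====
def Claim_equal_extract_significant_tokens : Prop := ∀ (pattern : String) (limit : Int), Dom_extract_significant_tokens pattern limit → Spec_extract_significant_tokens pattern limit (extract_significant_tokens pattern limit)

-- ===== LEMMAS AND PROOFS =====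

-- proof-side take loop: A's scan after dedup has been factored out of it
def pvLoopB (limit : Int) : List String → List String → List String
  | [], result => result
  | item :: rest, result =>
    let result' := result ++ [item]
    if limit ≤ (result'.length : Int) then result' else pvLoopB limit rest result'

-- first-occurrence dedup in its filter-recursive form (proof tool; shown equal to PySem.List.dedup below)
def pvD : List String → List String
  | [] => []
  | x :: l => x :: pvD (l.filter (fun y => !(y == x)))
termination_by l => l.length
decreasing_by simpa using le_trans (List.length_filter_le _ _) (le_of_eq List.length_attach)

theorem pvBeqDec (y x : String) : (y == x) = decide (y = x) := by
  by_cases h : y = x <;> simp [h]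

theorem pvRawA_eq (lines : List String) (acc : List String) :
    pvRawA lines acc = acc ++ (lines.map PySem.Str.strip).filter (fun part => decide ((4:Int) ≤ PySem.Str.len part)) := by
  induction lines generalizing acc with
  | nil => simp [pvRawA]
  | cons line rest ih =>
    simp only [pvRawA, List.map_cons, List.filter_cons]
    by_cases h0 : PySem.Str.strip line = ""
    · have h4 : ¬ ((4:Int) ≤ PySem.Str.len (PySem.Str.strip line)) := by
        rw [h0]; decide
      rw [if_pos h0, ih acc, if_neg (by simpa using h4)]
    · by_cases h4 : (4:Int) ≤ PySem.Str.len (PySem.Str.strip line)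
      · rw [if_neg h0, if_pos h4, ih (acc ++ [PySem.Str.strip line]),
          if_pos (by simpa using h4)]
        simp
      · rw [if_neg h0, if_neg h4, ih acc, if_neg (by simpa using h4)]

theorem contains_append_singleton (l : PySem.Set String) (x y : String) :
    PySem.Set.contains (l ++ [x]) y = (PySem.Set.contains l y || y == x) := by
  simp [PySem.Set.contains, pvBeqDec]

theorem contains_add (s : PySem.Set String) (x y : String) :
    (s.add x).contains y = (s.contains y || y == x) := by
  by_cases hx : x ∈ s
  · rw [show s.add x = s from by simp [PySem.Set.add, PySem.Set.contains, hx]]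
    rcases eq_or_ne y x with rfl | hne
    · simp [PySem.Set.contains, hx]
    · simp [hne]
  · rw [show s.add x = s ++ [x] from by simp [PySem.Set.add, PySem.Set.contains, hx]]
    exact contains_append_singleton s x y

theorem foldl_add_eq (l : List String) (acc : PySem.Set String) :
    List.foldl PySem.Set.add acc l = acc ++ pvD (l.filter (fun y => !(acc.contains y))) := by
  match l with
  | [] => simp [pvD]
  | x :: rest =>
    rw [List.foldl_cons, List.filter_cons]
    by_cases hx : x ∈ acc
    · rw [show PySem.Set.add acc x = acc from by simp [PySem.Set.add, PySem.Set.contains, hx]]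
      rw [if_neg (show ¬ ((!PySem.Set.contains acc x) = true) from by
          simp [PySem.Set.contains, hx]), foldl_add_eq rest acc]
    · rw [show PySem.Set.add acc x = acc ++ [x] from by simp [PySem.Set.add, PySem.Set.contains, hx]]
      rw [if_pos (show (!PySem.Set.contains acc x) = true from by
          simp [PySem.Set.contains, hx]), foldl_add_eq rest (acc ++ [x])]
      have hfc : rest.filter (fun y => !((acc ++ [x]).contains y))
          = (rest.filter (fun y => !(acc.contains y))).filter (fun y => !(y == x)) := by
        rw [List.filter_filter]
        apply List.filter_congr
        intro y _
        rw [show PySem.Set.contains (acc ++ [x]) y = (PySem.Set.contains acc y || y == x) from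
          contains_append_singleton acc x y]
        cases hc : PySem.Set.contains acc y <;> cases hb : y == x <;> simp_all
      rw [hfc]
      simp [pvD]
termination_by l.length
decreasing_by all_goals simp

theorem dedup_eq_pvD (l : List String) : PySem.List.dedup l = pvD l := by
  show PySem.Set.ofList l = pvD l
  rw [PySem.Set.ofList, foldl_add_eq l PySem.Set.empty]
  have h : l.filter (fun y => !((PySem.Set.empty : PySem.Set String).contains y)) = l := by
    apply List.filter_eq_self.mpr
    intro a _
    rfl
  rw [h]
  rfl

theorem loopA_eq (limit : Int) (l : List String) (result : List String) (seen : PySem.Set String) :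
    pvLoopA limit l result seen = pvLoopB limit (pvD (l.filter (fun y => !(seen.contains y)))) result := by
  match l with
  | [] => simp [pvLoopA, pvLoopB, pvD]
  | x :: rest =>
    simp only [pvLoopA, List.filter_cons]
    by_cases hx : x ∈ seen
    · rw [if_pos (show PySem.Set.contains seen x = true from by simp [PySem.Set.contains, hx]),
        if_neg (show ¬ ((!PySem.Set.contains seen x) = true) from by simp [PySem.Set.contains, hx])]
      exact loopA_eq limit rest result seen
    · rw [if_neg (show ¬ (PySem.Set.contains seen x = true) from by simp [PySem.Set.contains, hx]),
        if_pos (show (!PySem.Set.contains seen x) = true from by simp [PySem.Set.contains, hx])]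
      have hfc : rest.filter (fun y => !((seen.add x).contains y))
          = (rest.filter (fun y => !(seen.contains y))).filter (fun y => !(y == x)) := by
        rw [List.filter_filter]
        apply List.filter_congr
        intro y _
        rw [show PySem.Set.contains (seen.add x) y = (PySem.Set.contains seen y || y == x) from
          contains_add seen x y]
        cases hc : PySem.Set.contains seen y <;> cases hb : y == x <;> simp_all
      rw [show pvD (x :: rest.filter (fun y => !(seen.contains y)))
            = x :: pvD (rest.filter (fun y => !((seen.add x).contains y))) from by
          rw [hfc]; simp [pvD]]
      rw [pvLoopB]
      split_ifs with hlim
      · rfl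
      · exact loopA_eq limit rest (result ++ [x]) (seen.add x)
termination_by l.length
decreasing_by all_goals simp

theorem insertBy_nil (bf : String → String → Bool) (x : String) :
    PySem.List.insertBy bf x [] = [x] := by
  simp [PySem.List.insertBy]

theorem insertBy_pos (bf : String → String → Bool) (x y : String) (ys : List String)
    (h : bf x y = true) : PySem.List.insertBy bf x (y :: ys) = x :: y :: ys := by
  simp [PySem.List.insertBy, h]

theorem insertBy_neg (bf : String → String → Bool) (x y : String) (ys : List String)
    (h : bf x y = false) :
    PySem.List.insertBy bf x (y :: ys) = y :: PySem.List.insertBy bf x ys := by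
  simp [PySem.List.insertBy, h]

theorem filter_insertBy_of_false (bf : String → String → Bool) (p : String → Bool) (x : String)
    (hx : p x = false) (l : List String) :
    (PySem.List.insertBy bf x l).filter p = l.filter p := by
  induction l with
  | nil => simp [PySem.List.insertBy, hx]
  | cons y ys ih =>
    simp only [PySem.List.insertBy]
    split_ifs with h
    · simp [List.filter_cons, hx]
    · simp [List.filter_cons, ih]

theorem filter_insertBy (p : String → Bool) (x : String) (hx : p x = true) (l : List String)
    (hp : l.Pairwise (fun a b => PySem.Str.len b ≤ PySem.Str.len a)) :
    (PySem.List.insertBy (fun a b => decide (PySem.Str.len b < PySem.Str.len a)) x l).filter p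
      = PySem.List.insertBy (fun a b => decide (PySem.Str.len b < PySem.Str.len a)) x (l.filter p) := by
  induction l with
  | nil => simp [insertBy_nil, hx]
  | cons y ys ih =>
    rcases List.pairwise_cons.mp hp with ⟨hy, hys⟩
    by_cases hbf : PySem.Str.len y < PySem.Str.len x
    · rw [insertBy_pos _ _ _ _ (decide_eq_true hbf)]
      rw [List.filter_cons, if_pos (by simp [hx]), List.filter_cons]
      by_cases hpy : p y = true
      · rw [if_pos (by simp [hpy]), insertBy_pos _ _ _ _ (decide_eq_true hbf)]
      · rw [if_neg (by simp [hpy])]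
        cases hf : ys.filter p with
        | nil => rw [insertBy_nil]
        | cons z zs =>
          have hz : z ∈ ys := (List.mem_filter.mp (hf ▸ List.mem_cons_self)).1
          have hzx : PySem.Str.len z < PySem.Str.len x := lt_of_le_of_lt (hy z hz) hbf
          rw [insertBy_pos _ _ _ _ (decide_eq_true hzx)]
    · rw [insertBy_neg _ _ _ _ (decide_eq_false hbf)]
      rw [List.filter_cons, List.filter_cons]
      by_cases hpy : p y = true
      · rw [if_pos (by simp [hpy]), if_pos (by simp [hpy]),
          insertBy_neg _ _ _ _ (decide_eq_false hbf), ih hys]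
      · rw [if_neg (by simp [hpy]), if_neg (by simp [hpy]), ih hys]

theorem pvD_insert_mem (x : String) (l : List String)
    (hp : l.Pairwise (fun a b => PySem.Str.len b ≤ PySem.Str.len a)) (hx : x ∈ l) :
    pvD (PySem.List.insertBy (fun a b => decide (PySem.Str.len b < PySem.Str.len a)) x l) = pvD l := by
  match l with
  | [] => exact absurd hx (by simp)
  | y :: ys =>
    rcases List.pairwise_cons.mp hp with ⟨hy, hys⟩
    rcases eq_or_ne x y with rfl | hne
    · rw [insertBy_neg _ _ _ _ (decide_eq_false (lt_irrefl (PySem.Str.len x)))]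
      simp only [pvD]
      rw [filter_insertBy_of_false _ _ _ (by simp) ys]
    · have hxys : x ∈ ys := (List.mem_cons.mp hx).resolve_left hne
      have hle : PySem.Str.len x ≤ PySem.Str.len y := hy x hxys
      have hnb : ¬ (PySem.Str.len y < PySem.Str.len x) := not_lt.mpr hle
      rw [insertBy_neg _ _ _ _ (decide_eq_false hnb)]
      simp only [pvD]
      rw [filter_insertBy (fun z => !(z == y)) x (by simp [hne]) ys hys]
      congr 1
      exact pvD_insert_mem x (ys.filter (fun z => !(z == y)))
        (hys.filter _) (List.mem_filter.mpr ⟨hxys, by simp [hne]⟩)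
termination_by l.length
decreasing_by simpa using Nat.lt_succ_of_le (List.length_filter_le _ _)

theorem pvD_insert_not_mem (x : String) (l : List String)
    (hp : l.Pairwise (fun a b => PySem.Str.len b ≤ PySem.Str.len a)) (hx : x ∉ l) :
    pvD (PySem.List.insertBy (fun a b => decide (PySem.Str.len b < PySem.Str.len a)) x l)
      = PySem.List.insertBy (fun a b => decide (PySem.Str.len b < PySem.Str.len a)) x (pvD l) := by
  match l with
  | [] => rw [insertBy_nil]; simp [pvD, insertBy_nil]
  | y :: ys =>
    rcases List.pairwise_cons.mp hp with ⟨hy, hys⟩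
    have hne : x ≠ y := fun h => hx (h ▸ List.mem_cons_self)
    have hxys : x ∉ ys := fun h => hx (List.mem_cons_of_mem _ h)
    by_cases hbf : PySem.Str.len y < PySem.Str.len x
    · rw [insertBy_pos _ _ _ _ (decide_eq_true hbf)]
      simp only [pvD]
      have h1 : (y :: ys).filter (fun z => !(z == x)) = y :: ys := by
        apply List.filter_eq_self.mpr
        intro a ha
        have hax : a ≠ x := by
          intro h
          exact hx (h ▸ ha)
        simp [hax]
      rw [h1, insertBy_pos _ _ _ _ (decide_eq_true hbf)]
      simp only [pvD]
    · rw [insertBy_neg _ _ _ _ (decide_eq_false hbf)]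
      simp only [pvD]
      rw [filter_insertBy (fun z => !(z == y)) x (by simp [hne]) ys hys]
      rw [pvD_insert_not_mem x (ys.filter (fun z => !(z == y))) (hys.filter _)
        (fun h => hxys (List.mem_filter.mp h).1)]
      rw [insertBy_neg _ _ _ _ (decide_eq_false hbf)]
termination_by l.length
decreasing_by simpa using Nat.lt_succ_of_le (List.length_filter_le _ _)

theorem pvD_append_singleton (xs : List String) (x : String) :
    pvD (xs ++ [x]) = if x ∈ xs then pvD xs else pvD xs ++ [x] := by
  match xs with
  | [] => simp [pvD]
  | y :: ys =>
    rcases eq_or_ne x y with rfl | hne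
    · rw [if_pos List.mem_cons_self]
      show pvD (x :: (ys ++ [x])) = pvD (x :: ys)
      simp only [pvD]
      rw [List.filter_append, show List.filter (fun z => !(z == x)) [x] = [] from by simp,
        List.append_nil]
    · show pvD (y :: (ys ++ [x])) = _
      simp only [pvD]
      rw [List.filter_append, show List.filter (fun z => !(z == y)) [x] = [x] from by simp [hne]]
      rw [pvD_append_singleton (ys.filter (fun z => !(z == y))) x]
      by_cases hmem : x ∈ ys
      · rw [if_pos (List.mem_filter.mpr ⟨hmem, by simp [hne]⟩),
          if_pos (List.mem_cons_of_mem _ hmem)]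
      · rw [if_neg (fun h => hmem (List.mem_filter.mp h).1), if_neg (by simp [hne, hmem])]
        simp only [List.cons_append]
termination_by xs.length
decreasing_by simpa using Nat.lt_succ_of_le (List.length_filter_le _ _)

theorem pvD_sorted_comm (xs : List String) :
    pvD (PySem.List.sorted xs PySem.Str.len true) = PySem.List.sorted (pvD xs) PySem.Str.len true := by
  induction xs using List.reverseRecOn with
  | nil => simp [PySem.List.sorted, pvD]
  | append_singleton xs x ih =>
    rw [PySem.List.sorted_rev_eq_foldl_insertBy (xs ++ [x]) PySem.Str.len, List.foldl_append,
      List.foldl_cons, List.foldl_nil, ← PySem.List.sorted_rev_eq_foldl_insertBy xs PySem.Str.len]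
    rw [pvD_append_singleton]
    by_cases hmem : x ∈ xs
    · rw [if_pos hmem, pvD_insert_mem x _ (PySem.List.sorted_pairwise_rev xs PySem.Str.len)
        ((PySem.List.mem_sorted xs PySem.Str.len true x).mpr hmem), ih]
    · rw [if_neg hmem, pvD_insert_not_mem x _ (PySem.List.sorted_pairwise_rev xs PySem.Str.len)
        (fun h => hmem ((PySem.List.mem_sorted xs PySem.Str.len true x).mp h)), ih]
      rw [PySem.List.sorted_rev_eq_foldl_insertBy (pvD xs ++ [x]) PySem.Str.len, List.foldl_append,
        List.foldl_cons, List.foldl_nil, ← PySem.List.sorted_rev_eq_foldl_insertBy (pvD xs) PySem.Str.len]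

-- ===== new lemmas for the B side (selection of maxima) =====

theorem mem_pvD {x : String} {l : List String} (h : x ∈ pvD l) : x ∈ l := by
  rw [← dedup_eq_pvD] at h
  exact (PySem.List.mem_dedup _ _).mp h

-- dedup commutes with a value-filter
theorem pvD_filter (p : String → Bool) (l : List String) :
    pvD (l.filter p) = (pvD l).filter p := by
  match l with
  | [] => simp [pvD]
  | x :: rest =>
    rw [List.filter_cons]
    by_cases hx : p x = true
    · rw [if_pos hx]
      simp only [pvD]
      rw [List.filter_cons, if_pos hx]
      congr 1
      rw [List.filter_comm, pvD_filter p (rest.filter (fun y => !(y == x)))]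
    · rw [if_neg (by simpa using hx)]
      simp only [pvD]
      rw [List.filter_cons, if_neg (by simpa using hx)]
      rw [← pvD_filter p (rest.filter (fun y => !(y == x))), List.filter_comm]
      congr 1
      apply (List.filter_eq_self.mpr _).symm
      intro a ha
      have hax : a ≠ x := by
        intro hax
        exact hx (hax ▸ (List.mem_filter.mp ha).2)
      simp [hax]
termination_by l.length
decreasing_by all_goals simpa using Nat.lt_succ_of_le (List.length_filter_le _ _)

-- the stable descending sort commutes with a value-filter
theorem sorted_filter (p : String → Bool) (l : List String) :
    PySem.List.sorted (l.filter p) PySem.Str.len true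
      = (PySem.List.sorted l PySem.Str.len true).filter p := by
  induction l using List.reverseRecOn with
  | nil => simp [PySem.List.sorted]
  | append_singleton l x ih =>
    rw [PySem.List.sorted_rev_eq_foldl_insertBy (l ++ [x]) PySem.Str.len, List.foldl_append,
      List.foldl_cons, List.foldl_nil, ← PySem.List.sorted_rev_eq_foldl_insertBy l PySem.Str.len,
      List.filter_append]
    by_cases hx : p x = true
    · rw [show List.filter p [x] = [x] from by simp [hx]]
      rw [PySem.List.sorted_rev_eq_foldl_insertBy (l.filter p ++ [x]) PySem.Str.len,
        List.foldl_append, List.foldl_cons, List.foldl_nil,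
        ← PySem.List.sorted_rev_eq_foldl_insertBy (l.filter p) PySem.Str.len]
      rw [ih, ← filter_insertBy p x hx _ (PySem.List.sorted_pairwise_rev l PySem.Str.len)]
    · have hfx : List.filter p [x] = [] := by simp [hx]
      rw [hfx, List.append_nil, ih, filter_insertBy_of_false _ p x (by simpa using hx)]

-- max? over an extra final element
theorem max?_append_some (l : List String) (x m : String)
    (h : PySem.List.max? l PySem.Str.len = some m) :
    PySem.List.max? (l ++ [x]) PySem.Str.len
      = if PySem.Str.len m < PySem.Str.len x then some x else some m := by
  simp only [PySem.List.max?] at h ⊢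
  rw [List.foldl_append, h, List.foldl_cons, List.foldl_nil]

-- STABILITY: the head of the stable descending sort is Python's max(pool, key=len) (first maximal)
theorem max?_eq_head_sorted (l : List String) (m : String) (t : List String)
    (h : PySem.List.sorted l PySem.Str.len true = m :: t) :
    PySem.List.max? l PySem.Str.len = some m := by
  induction l using List.reverseRecOn generalizing m t with
  | nil =>
    rw [show PySem.List.sorted ([] : List String) PySem.Str.len true = [] from
      (PySem.List.sorted_eq_nil_iff _ _ _).mpr rfl] at h
    exact absurd h (by simp)
  | append_singleton l x ih =>
    rw [PySem.List.sorted_rev_eq_foldl_insertBy (l ++ [x]) PySem.Str.len, List.foldl_append,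
      List.foldl_cons, List.foldl_nil, ← PySem.List.sorted_rev_eq_foldl_insertBy l PySem.Str.len] at h
    cases hs : PySem.List.sorted l PySem.Str.len true with
    | nil =>
      have hl : l = [] := (PySem.List.sorted_eq_nil_iff _ _ _).mp hs
      subst hl
      rw [hs, insertBy_nil] at h
      injection h with h1 _
      subst h1
      rfl
    | cons m' t' =>
      rw [hs] at h
      rw [max?_append_some l x m' (ih m' t' hs)]
      by_cases hbf : PySem.Str.len m' < PySem.Str.len x
      · rw [insertBy_pos _ _ _ _ (decide_eq_true hbf)] at h
        injection h with h1 _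
        subst h1
        rw [if_pos hbf]
      · rw [insertBy_neg _ _ _ _ (decide_eq_false hbf)] at h
        injection h with h1 _
        subst h1
        rw [if_neg hbf]

-- the key step: selecting the first maximum and dropping its copies peels one element
-- off the sorted deduplicated list
theorem select_step (pool : List String) (best : String)
    (hm : PySem.List.max? pool PySem.Str.len = some best) :
    PySem.List.sorted (pvD pool) PySem.Str.len true
      = best :: PySem.List.sorted (pvD (pool.filter (fun x => !(x == best)))) PySem.Str.len true := by
  have hnil : pool ≠ [] := by
    intro h
    rw [h] at hm
    exact absurd hm (by simp [PySem.List.max?])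
  cases hs : PySem.List.sorted pool PySem.Str.len true with
  | nil => exact absurd ((PySem.List.sorted_eq_nil_iff _ _ _).mp hs) hnil
  | cons m t =>
    have hbm : best = m := by
      have := max?_eq_head_sorted pool m t hs
      rw [hm] at this
      injection this
    subst hbm
    have hS : PySem.List.sorted (pvD pool) PySem.Str.len true
        = best :: pvD (t.filter (fun y => !(y == best))) := by
      rw [← pvD_sorted_comm, hs]
      simp only [pvD]
    rw [hS]
    congr 1
    rw [pvD_filter (fun x => !(x == best)) pool,
      sorted_filter (fun x => !(x == best)) (pvD pool), hS, List.filter_cons,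
      if_neg (by simp)]
    symm
    apply List.filter_eq_self.mpr
    intro a ha
    exact (List.mem_filter.mp (mem_pvD ha)).2

-- unfolding equations of pvSelect, one per branch of its match
theorem pvSelect_none (limit : Int) (pool result : List String)
    (h : PySem.List.max? pool PySem.Str.len = none) : pvSelect limit pool result = result := by
  unfold pvSelect
  rw [h]

theorem pvSelect_some (limit : Int) (pool result : List String) (best : String)
    (h : PySem.List.max? pool PySem.Str.len = some best) :
    pvSelect limit pool result =
      (if limit ≤ ((result ++ [best]).length : Int) then result ++ [best]
       else pvSelect limit (pool.filter (fun x => !(x == best))) (result ++ [best])) := by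
  conv_lhs => unfold pvSelect
  rw [h]

-- B's selection loop computes A's take-loop over the sorted deduplicated pool
theorem pvSelect_eq (limit : Int) (pool result : List String) :
    pvSelect limit pool result
      = pvLoopB limit (PySem.List.sorted (pvD pool) PySem.Str.len true) result := by
  cases hm : PySem.List.max? pool PySem.Str.len with
  | none =>
    have hp : pool = [] := (PySem.List.max?_eq_none_iff _ _).mp hm
    subst hp
    rw [pvSelect_none limit [] result hm]
    rw [show PySem.List.sorted (pvD ([] : List String)) PySem.Str.len true = [] from
      (PySem.List.sorted_eq_nil_iff _ _ _).mpr (by simp [pvD])]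
    rfl
  | some best =>
    rw [select_step pool best hm, pvSelect_some limit pool result best hm]
    simp only [pvLoopB]
    split_ifs with hlim
    · rfl
    · exact pvSelect_eq limit (pool.filter (fun x => !(x == best))) (result ++ [best])
termination_by pool.length
decreasing_by
  exact List.length_filter_lt_length_iff_exists.mpr ⟨best, PySem.List.max?_mem hm, by simp⟩

-- ===== VERDICT (by name: the statement is the Claim_ definition above) =====
theorem extract_significant_tokens_spec : Claim_equal_extract_significant_tokens := by
  intro pattern limit _
  show extract_significant_tokens pattern limit = extract_significant_tokens_alt pattern limit
  unfold extract_significant_tokens extract_significant_tokens_alt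
  dsimp only
  rw [pvRawA_eq, List.nil_append, loopA_eq, pvSelect_eq]
  have hfe : ∀ (l : List String), l.filter (fun y => !((PySem.Set.empty : PySem.Set String).contains y)) = l := by
    intro l; apply List.filter_eq_self.mpr; intro a _; rfl
  rw [hfe, pvD_sorted_comm]
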